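-- pv_equiv track=rewrite | github.com/HovhannesManushyan/HPMACS | crypt_utils.py | build_key_from_mapping
-- ===== SOURCE A (Python) =====
-- def build_key_from_mapping(mapping):
--     """
--     Build the key string for decryption from cipher_ord to plain_ord mapping.
--
--     Parameters:
--     - mapping (dict): Mapping from cipher letter ord to plain letter ord.
--
--     Returns:
--     - key_str (str): 26-character key string where key[i] is the plain letter for 'a' + i.
--                       Unmapped letters are represented by '_'.
--     """
--     key = ['_'] * 26  # Initialize with '_' for unmapped letters
--     reverse_mapping = {}
--     for cipher_ord, plain_ord in mapping.items():
--         plain_char = chr(plain_ord)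
--         cipher_char = chr(cipher_ord)
--         reverse_mapping[plain_char] = cipher_char
--
--     for i in range(26):
--         plain_char = chr(ord('a') + i)
--         if plain_char in reverse_mapping:
--             key[i] = reverse_mapping[plain_char]
--         else:
--             key[i] = '_'  # Use '_' for unmapped letters
--
--     return ''.join(key)
-- ===== SOURCE B (Python) =====
-- def build_key_from_mapping(mapping):
--     key = ['_'] * 26
--     for cipher_ord, plain_ord in mapping.items():
--         idx = plain_ord - ord('a')
--         if 0 <= idx < 26:
--             key[idx] = chr(cipher_ord)
--     return ''.join(key)
-- ===== Notes on version B (the rewrite author's own statement) =====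
-- stated objective: simpler
-- what changed: B fills the 26-slot key directly in one pass over mapping.items() (writing key[plain_ord - ord('a')] when in range), instead of building a reverse char-keyed dict and then scanning range(26) against it.
-- outside the precondition, e.g. on build_key_from_mapping({55296: 32}): A returns '__________________________', B returns '__________________________'
import Mathlib
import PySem

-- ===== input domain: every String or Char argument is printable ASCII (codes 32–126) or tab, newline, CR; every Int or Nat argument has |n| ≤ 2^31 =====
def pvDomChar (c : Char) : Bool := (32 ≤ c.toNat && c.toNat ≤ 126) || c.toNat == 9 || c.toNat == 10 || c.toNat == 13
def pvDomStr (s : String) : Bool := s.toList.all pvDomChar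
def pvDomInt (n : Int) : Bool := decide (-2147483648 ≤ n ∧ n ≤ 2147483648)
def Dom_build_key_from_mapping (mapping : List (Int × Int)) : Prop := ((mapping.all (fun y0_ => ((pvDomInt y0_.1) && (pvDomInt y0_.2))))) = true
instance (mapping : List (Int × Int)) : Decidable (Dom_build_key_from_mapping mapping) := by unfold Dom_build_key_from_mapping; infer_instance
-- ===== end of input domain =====

-- B fills the 26-slot key directly in one pass over the mapping items, instead of
-- building a reverse dictionary and then scanning the 26 positions (simpler decomposition, same cost).


-- ===== PORT A =====
-- chr(n) is ported as Char.ofNat n.toNat: exact for 0 ≤ n ≤ 0x10FFFF outside the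
-- surrogate range (guaranteed by Pre_ for the ords that can reach the output).
def build_key_from_mapping (mapping : List (Int × Int)) : String :=
  let key : List Char := List.replicate 26 '_'
  let reverse_mapping : PySem.Dict Int Int :=
    mapping.foldl (fun d cp => d.insert cp.2 cp.1) PySem.Dict.empty
  let key := (PySem.List.pyRange 0 26 1).foldl (fun k i =>
    match reverse_mapping.get? (97 + i) with
    | some c => k.set i.toNat (Char.ofNat c.toNat)
    | none => k.set i.toNat '_') key
  String.mk key

-- ===== PORT B =====
def build_key_from_mapping_alt (mapping : List (Int × Int)) : String :=
  String.mk (mapping.foldl (fun k cp =>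
      let idx := cp.2 - 97
      if 0 ≤ idx ∧ idx < 26 then k.set idx.toNat (Char.ofNat cp.1.toNat) else k)
    (List.replicate 26 '_'))

-- ===== PRECONDITION & SPEC =====
-- Pre_ excludes (a) any ord outside chr's domain 0..0x10FFFF, where Python A raises
-- ValueError; (b) cipher ords in the UTF-16 surrogate range, where A returns a string
-- containing a lone surrogate that a Lean Char/String cannot represent; and (c) duplicate
-- cipher ords, which cannot occur among the keys of the Python dict argument.
def Pre_build_key_from_mapping (mapping : List (Int × Int)) : Prop :=
  (mapping.map Prod.fst).Nodup ∧
  ∀ cp ∈ mapping,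
    (0 ≤ cp.1 ∧ cp.1 ≤ 1114111 ∧ ¬(55296 ≤ cp.1 ∧ cp.1 ≤ 57343)) ∧
    (0 ≤ cp.2 ∧ cp.2 ≤ 1114111)
instance (mapping : List (Int × Int)) : Decidable (Pre_build_key_from_mapping mapping) := by
  unfold Pre_build_key_from_mapping; infer_instance

def pvWitness_build_key_from_mapping : (List (Int × Int)) := [(98, 97), (99, 100)]

def Spec_build_key_from_mapping (mapping : List (Int × Int)) (out : String) : Prop := out = build_key_from_mapping_alt mapping
instance (mapping : List (Int × Int)) (out : String) : Decidable (Spec_build_key_from_mapping mapping out) := by unfold Spec_build_key_from_mapping; infer_instance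

-- ===== CLAIM (what is proved, stated in full; the proofs are below) =====
def Claim_equal_build_key_from_mapping : Prop := ∀ (mapping : List (Int × Int)), Dom_build_key_from_mapping mapping → Pre_build_key_from_mapping mapping → Spec_build_key_from_mapping mapping (build_key_from_mapping mapping)

-- ===== LEMMAS AND PROOFS =====

-- the character the final key holds for slot i, given the reverse dictionary
def pvSlot (d : PySem.Dict Int Int) (i : Int) : Char :=
  match d.get? (97 + i) with
  | some c => Char.ofNat c.toNat
  | none => '_'

-- the 26-character key rendered from a reverse dictionary
def pvRender (d : PySem.Dict Int Int) : List Char :=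
  List.ofFn (fun i : Fin 26 => pvSlot d (i : Int))

lemma pvRender_length (d : PySem.Dict Int Int) : (pvRender d).length = 26 := by
  simp [pvRender]

lemma pvRender_empty : pvRender PySem.Dict.empty = List.replicate 26 '_' := by
  decide

lemma pvFoldSet_length (f : Int → Char) (js : List Int) (k : List Char) :
    (js.foldl (fun k i => k.set i.toNat (f i)) k).length = k.length := by
  induction js generalizing k with
  | nil => rfl
  | cons i t ih => rw [List.foldl_cons, ih, List.length_set]

lemma pvFoldSet_getElem (f : Int → Char) (js : List Int) (k : List Char) (m : Nat)
    (hm : m < k.length) (h0 : ∀ i ∈ js, 0 ≤ i)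
    (hm2 : m < (js.foldl (fun k i => k.set i.toNat (f i)) k).length) :
    (js.foldl (fun k i => k.set i.toNat (f i)) k)[m]
      = if (m : Int) ∈ js then f m else k[m] := by
  induction js generalizing k with
  | nil => simp
  | cons i t ih =>
    have h0i : (0 : Int) ≤ i := h0 i (List.mem_cons_self ..)
    have hm' : m < (k.set i.toNat (f i)).length := by simpa using hm
    simp only [List.foldl_cons] at hm2 ⊢
    rw [ih (k.set i.toNat (f i)) hm' (fun j hj => h0 j (List.mem_cons_of_mem _ hj)) hm2]
    by_cases hmem : (m : Int) ∈ t
    · simp [hmem]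
    · rw [if_neg hmem, List.getElem_set]
      by_cases heq : i.toNat = m
      · have hieq : i = (m : Int) := by omega
        rw [if_pos heq, if_pos (by simp [hieq]), hieq]
      · have hne : i ≠ (m : Int) := by omega
        rw [if_neg heq, if_neg (by simp [List.mem_cons, hmem]; omega)]

lemma lemA (d : PySem.Dict Int Int) :
    (PySem.List.pyRange 0 26 1).foldl (fun k i =>
      match d.get? (97 + i) with
      | some c => k.set i.toNat (Char.ofNat c.toNat)
      | none => k.set i.toNat '_') (List.replicate 26 '_') = pvRender d := by
  have hstep : ∀ (k : List Char) (i : Int),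
      (match d.get? (97 + i) with
        | some c => k.set i.toNat (Char.ofNat c.toNat)
        | none => k.set i.toNat '_') = k.set i.toNat (pvSlot d i) := by
    intro k i
    unfold pvSlot
    cases d.get? (97 + i) <;> rfl
  simp only [hstep]
  have h0 : ∀ i ∈ PySem.List.pyRange 0 26 1, (0 : Int) ≤ i := by
    intro i hi
    rw [PySem.List.mem_pyRange_one] at hi
    exact hi.1
  apply List.ext_getElem
  · rw [pvFoldSet_length, pvRender_length, List.length_replicate]
  · intro m h1 h2
    have hm26 : m < 26 := by simpa [pvRender_length] using h2
    have hmrep : m < (List.replicate 26 '_').length := by simpa using hm26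
    rw [pvFoldSet_getElem (pvSlot d) _ _ m hmrep h0 h1,
        if_pos (by rw [PySem.List.mem_pyRange_one]; omega)]
    simp only [pvRender, List.getElem_ofFn]

-- looking a slot up after an insert
lemma pvSlot_insert (d : PySem.Dict Int Int) (c p i : Int) :
    pvSlot (d.insert p c) i = if 97 + i = p then Char.ofNat c.toNat else pvSlot d i := by
  unfold pvSlot
  rw [PySem.Dict.get?_insert]
  split_ifs <;> rfl

-- inserting one pair into the reverse dictionary = one conditional in-place write on the key
lemma pvRender_insert (d : PySem.Dict Int Int) (c p : Int) :
    (if 0 ≤ p - 97 ∧ p - 97 < 26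
      then (pvRender d).set (p - 97).toNat (Char.ofNat c.toNat)
      else pvRender d) = pvRender (d.insert p c) := by
  split_ifs with h
  · apply List.ext_getElem
    · simp [pvRender]
    · intro m h1 h2
      have hm26 : m < 26 := by simpa [pvRender_length] using h2
      rw [List.getElem_set]
      simp only [pvRender, List.getElem_ofFn, pvSlot_insert]
      split_ifs with c1 c2 c2
      · rfl
      · exact absurd (by omega) c2
      · exact absurd (by omega : (p - 97).toNat = m) c1
      · rfl
  · apply List.ext_getElem
    · simp [pvRender]
    · intro m h1 h2
      have hm26 : m < 26 := by simpa [pvRender_length] using h1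
      simp only [pvRender, List.getElem_ofFn, pvSlot_insert]
      rw [if_neg (by omega)]

-- B's single pass keeps the key equal to the render of the reverse dictionary built so far
lemma lemB : ∀ (l : List (Int × Int)) (d : PySem.Dict Int Int),
    l.foldl (fun k cp =>
        let idx := cp.2 - 97
        if 0 ≤ idx ∧ idx < 26 then k.set idx.toNat (Char.ofNat cp.1.toNat) else k)
      (pvRender d)
    = pvRender (l.foldl (fun d cp => d.insert cp.2 cp.1) d) := by
  intro l
  induction l with
  | nil => intro d; rfl
  | cons cp t ih =>
    intro d
    simp only [List.foldl]
    rw [show (let idx := cp.2 - 97;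
        if 0 ≤ idx ∧ idx < 26 then (pvRender d).set idx.toNat (Char.ofNat cp.1.toNat)
        else pvRender d) = pvRender (d.insert cp.2 cp.1) from pvRender_insert d cp.1 cp.2]
    exact ih (d.insert cp.2 cp.1)

-- ===== VERDICT (by name: the statement is the Claim_ definition above) =====
theorem build_key_from_mapping_spec : Claim_equal_build_key_from_mapping := by
  intro mapping _ _
  show build_key_from_mapping mapping = build_key_from_mapping_alt mapping
  have hA : build_key_from_mapping mapping =
      String.mk ((PySem.List.pyRange 0 26 1).foldl (fun k i =>
        match (mapping.foldl (fun d cp => d.insert cp.2 cp.1) PySem.Dict.empty).get? (97 + i) with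
        | some c => k.set i.toNat (Char.ofNat c.toNat)
        | none => k.set i.toNat '_') (List.replicate 26 '_')) := rfl
  rw [hA, lemA, build_key_from_mapping_alt, ← pvRender_empty, lemB]
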